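-- pv_equiv track=rewrite | github.com/Ziheng-lin1030/MLSE-PlayerBERT | facet_similarity_tools.py | resolve_player_id_from_query
-- ===== SOURCE A (Python) =====
-- from typing import Any
--
-- def normalize_text(value: Any) -> str:
--     return " ".join(str(value).strip().lower().split())
--
-- def resolve_player_id_from_query(player_query: str, player_names: dict[str, str], valid_player_ids: set[str]) -> str:
--     player_query = str(player_query).strip()
--     if player_query in valid_player_ids:
--         return player_query
--
--     exact = [player_id for player_id, name in player_names.items() if name == player_query]
--     if len(exact) == 1:
--         return exact[0]
--     if len(exact) > 1:
--         raise ValueError(f"Ambiguous player name '{player_query}'. Matches ids: {', '.join(exact)}")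
--
--     folded_query = normalize_text(player_query)
--     folded = [player_id for player_id, name in player_names.items() if normalize_text(name) == folded_query]
--     if len(folded) == 1:
--         return folded[0]
--     if len(folded) > 1:
--         raise ValueError(f"Ambiguous player name '{player_query}'. Matches ids: {', '.join(folded)}")
--
--     raise ValueError(f"Player '{player_query}' not found.")
-- ===== SOURCE B (Python) =====
-- def normalize_text(value):
--     return " ".join(str(value).strip().lower().split())
--
--
-- def resolve_player_id_from_query(player_query: str, player_names: dict, valid_player_ids: set) -> str:
--     player_query = str(player_query).strip()
--     if player_query in valid_player_ids:
--         return player_query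
--     exact_index = {}
--     folded_index = {}
--     for player_id, name in player_names.items():
--         exact_index.setdefault(name, []).append(player_id)
--         folded_index.setdefault(normalize_text(name), []).append(player_id)
--     for bucket in (exact_index.get(player_query), folded_index.get(normalize_text(player_query))):
--         if bucket:
--             if len(bucket) == 1:
--                 return bucket[0]
--             raise ValueError(f"Ambiguous player name '{player_query}'. Matches ids: {', '.join(bucket)}")
--     raise ValueError(f"Player '{player_query}' not found.")
-- ===== Notes on version B (the rewrite author's own statement) =====
-- stated objective: idiomatic
-- what changed: Instead of two separate filtering passes over player_names (exact match, then normalized match), B makes one forward pass that groups ids into two dicts keyed by raw and normalized name, then resolves the query by two bucket lookups with the same precedence and in-order ids.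
import Mathlib
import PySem

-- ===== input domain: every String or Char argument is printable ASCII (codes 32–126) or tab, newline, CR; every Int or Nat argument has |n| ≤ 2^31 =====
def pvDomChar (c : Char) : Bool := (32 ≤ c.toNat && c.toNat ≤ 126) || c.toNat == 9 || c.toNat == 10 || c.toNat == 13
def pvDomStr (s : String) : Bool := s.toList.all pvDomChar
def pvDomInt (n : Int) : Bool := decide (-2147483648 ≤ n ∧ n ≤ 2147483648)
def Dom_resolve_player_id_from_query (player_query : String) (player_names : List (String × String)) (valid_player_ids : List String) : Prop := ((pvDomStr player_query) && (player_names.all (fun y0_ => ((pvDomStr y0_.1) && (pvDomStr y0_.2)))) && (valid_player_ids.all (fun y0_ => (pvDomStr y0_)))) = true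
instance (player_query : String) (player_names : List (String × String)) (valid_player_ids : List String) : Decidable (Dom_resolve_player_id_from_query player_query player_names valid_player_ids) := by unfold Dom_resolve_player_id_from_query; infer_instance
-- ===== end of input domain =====

-- B replaces A's two filtering passes over player_names by one grouping pass into two
-- bucket dicts (raw name → ids, normalized name → ids) resolved by lookups; same results.


-- normalize_text: " ".join(str(value).strip().lower().split())  (shared helper of A and B)
def pvNormalize (s : String) : String :=
  PySem.Str.join " " (PySem.Str.split₀ (PySem.Str.lower (PySem.Str.strip s)))

-- ===== PORT A =====
-- raise branches (ambiguous / not found) are excluded by Pre_; the port returns "" there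
def resolve_player_id_from_query (player_query : String) (player_names : List (String × String)) (valid_player_ids : List String) : String :=
  let player_query := PySem.Str.strip player_query
  if player_query ∈ valid_player_ids then player_query
  else
    let exact := (player_names.filter (fun p => p.2 == player_query)).map (fun p => p.1)
    if exact.length = 1 then exact.headD ""
    else if 1 < exact.length then ""   -- raise ValueError (ambiguous)
    else
      let folded_query := pvNormalize player_query
      let folded := (player_names.filter (fun p => pvNormalize p.2 == folded_query)).map (fun p => p.1)
      if folded.length = 1 then folded.headD ""
      else if 1 < folded.length then ""   -- raise ValueError (ambiguous)
      else ""   -- raise ValueError (not found)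

-- ===== PORT B =====
def resolve_player_id_from_query_alt (player_query : String) (player_names : List (String × String)) (valid_player_ids : List String) : String :=
  let q := PySem.Str.strip player_query
  if q ∈ valid_player_ids then q
  else
    -- one forward pass: group ids into two bucket dicts (setdefault(...).append)
    let idx := player_names.foldl
      (fun (s : PySem.Dict String (List String) × PySem.Dict String (List String)) p =>
        (s.1.modify p.2 [] (fun b => b ++ [p.1]),
         s.2.modify (pvNormalize p.2) [] (fun b => b ++ [p.1])))
      (PySem.Dict.empty, PySem.Dict.empty)
    match idx.1.getD q [] with
    | [pid] => pid
    | _ :: _ :: _ => ""   -- raise ValueError (ambiguous)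
    | [] =>
      match idx.2.getD (pvNormalize q) [] with
      | [pid] => pid
      | _ :: _ :: _ => ""   -- raise ValueError (ambiguous)
      | [] => ""   -- raise ValueError (not found)

-- ===== PRECONDITION & SPEC =====
-- Pre_ excludes exactly the inputs where Python A raises ValueError (ambiguous name, or
-- query neither a valid id nor matching any name); B raises the same errors there.
def Pre_resolve_player_id_from_query (player_query : String) (player_names : List (String × String)) (valid_player_ids : List String) : Prop :=
  let q := PySem.Str.strip player_query
  q ∈ valid_player_ids ∨
    (player_names.filter (fun p => p.2 == q)).length = 1 ∨
    ((player_names.filter (fun p => p.2 == q)) = [] ∧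
     (player_names.filter (fun p => pvNormalize p.2 == pvNormalize q)).length = 1)
instance (player_query : String) (player_names : List (String × String)) (valid_player_ids : List String) : Decidable (Pre_resolve_player_id_from_query player_query player_names valid_player_ids) := by unfold Pre_resolve_player_id_from_query; infer_instance

def pvWitness_resolve_player_id_from_query : String × (List (String × String)) × List String :=
  ("p7", [("p1", "Ann"), ("p2", "Bob")], ["p7"])

def Spec_resolve_player_id_from_query (player_query : String) (player_names : List (String × String)) (valid_player_ids : List String) (out : String) : Prop := out = resolve_player_id_from_query_alt player_query player_names valid_player_ids
instance (player_query : String) (player_names : List (String × String)) (valid_player_ids : List String) (out : String) : Decidable (Spec_resolve_player_id_from_query player_query player_names valid_player_ids out) := by unfold Spec_resolve_player_id_from_query; infer_instance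

-- ===== CLAIM (what is proved, stated in full; the proofs are below) =====
def Claim_equal_resolve_player_id_from_query : Prop := ∀ (player_query : String) (player_names : List (String × String)) (valid_player_ids : List String), Dom_resolve_player_id_from_query player_query player_names valid_player_ids → Pre_resolve_player_id_from_query player_query player_names valid_player_ids → Spec_resolve_player_id_from_query player_query player_names valid_player_ids (resolve_player_id_from_query player_query player_names valid_player_ids)

-- ===== LEMMAS AND PROOFS =====

-- B's grouping pass, read back at key c, is exactly A's filtering pass with key f.
theorem pv_bucket_eq (player_names : List (String × String)) (f : String → String) (c : String) :
    (player_names.foldl (fun (d : PySem.Dict String (List String)) p => d.modify (f p.2) [] (fun b => b ++ [p.1])) PySem.Dict.empty).getD c []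
      = (player_names.filter (fun p => f p.2 == c)).map (fun p => p.1) := by
  have h := PySem.Dict.getD_foldl_modify_append (player_names.map (fun p => (f p.2, p.1))) (PySem.Dict.empty) c
  rw [List.foldl_map, List.filter_map, List.map_map] at h
  simpa using h

theorem resolve_eq (player_query : String) (player_names : List (String × String)) (valid_player_ids : List String) :
    resolve_player_id_from_query player_query player_names valid_player_ids
      = resolve_player_id_from_query_alt player_query player_names valid_player_ids := by
  unfold resolve_player_id_from_query resolve_player_id_from_query_alt
  rw [PySem.List.foldl_prod_mk
        (fun (d : PySem.Dict String (List String)) (p : String × String) => d.modify p.2 [] (fun b => b ++ [p.1]))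
        (fun (d : PySem.Dict String (List String)) (p : String × String) => d.modify (pvNormalize p.2) [] (fun b => b ++ [p.1]))]
  by_cases hin : PySem.Str.strip player_query ∈ valid_player_ids
  · simp [hin]
  · simp only [hin, if_false]
    rw [show ((player_names.foldl (fun (d : PySem.Dict String (List String)) p => d.modify p.2 [] (fun b => b ++ [p.1])) PySem.Dict.empty,
              player_names.foldl (fun (d : PySem.Dict String (List String)) p => d.modify (pvNormalize p.2) [] (fun b => b ++ [p.1])) PySem.Dict.empty) :
              PySem.Dict String (List String) × PySem.Dict String (List String)).1.getD (PySem.Str.strip player_query) []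
          = (player_names.filter (fun p => p.2 == PySem.Str.strip player_query)).map (fun p => p.1)
        from pv_bucket_eq player_names (fun n => n) _,
       show ((player_names.foldl (fun (d : PySem.Dict String (List String)) p => d.modify p.2 [] (fun b => b ++ [p.1])) PySem.Dict.empty,
              player_names.foldl (fun (d : PySem.Dict String (List String)) p => d.modify (pvNormalize p.2) [] (fun b => b ++ [p.1])) PySem.Dict.empty) :
              PySem.Dict String (List String) × PySem.Dict String (List String)).2.getD (pvNormalize (PySem.Str.strip player_query)) []
          = (player_names.filter (fun p => pvNormalize p.2 == pvNormalize (PySem.Str.strip player_query))).map (fun p => p.1)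
        from pv_bucket_eq player_names pvNormalize _]
    rcases h1 : player_names.filter (fun p => p.2 == PySem.Str.strip player_query) with _ | ⟨x, _ | ⟨y, t⟩⟩
    · simp only [h1]
      rcases h2 : player_names.filter (fun p => pvNormalize p.2 == pvNormalize (PySem.Str.strip player_query)) with _ | ⟨x, _ | ⟨y, t⟩⟩ <;> simp [h2]
    · simp [h1]
    · simp [h1]

-- ===== VERDICT (by name: the statement is the Claim_ definition above) =====
theorem resolve_player_id_from_query_spec : Claim_equal_resolve_player_id_from_query := by
  intro player_query player_names valid_player_ids _ _
  exact resolve_eq player_query player_names valid_player_ids
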